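-- pv_equiv track=rewrite | github.com/nishant-ns19/Lucene-Query-Formatter | utils.py | remove_multiple_spaces
-- ===== SOURCE A (Python) =====
-- NEW_LINE = '\n'
--
-- RETURN = '\r'
--
-- TAB = '\t'
--
-- WHITESPACE = ' '
--
-- def is_spacing_character(ch):
--     return True if ch == WHITESPACE or ch == TAB or ch == NEW_LINE or ch == RETURN else False
--
-- def is_comma_or_colon(ch):
--     return True if ch == ',' or ch == ':' else False
--
-- def remove_multiple_spaces(query, is_quoted):
--     query_new = ""
--     in_phrase = False
--     idx = 0
--     while idx < len(query):
--         query_new += query[idx]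
--         if query[idx] == '\"':
--             # toggle in_phrase whenever ' " ' is encountered
--             in_phrase = 1 ^ in_phrase
--             idx += 1
--             continue
--
--         if in_phrase:
--             # handling escape character
--             if query[idx] == '\\' and is_quoted and idx < (len(query)-1):
--                 query_new += query[idx+1]
--                 idx += 1
--             idx += 1
--             continue
--
--         # 'query_new=query_new[:-1]' is used to remove complete
--         # space sequence when found around a comma(,) or colon(:)
--         if is_spacing_character(query[idx]):
--             if idx >= 1 and is_comma_or_colon(query[idx-1]):
--                 query_new = query_new[:-1]
--
--             while idx < len(query) and is_spacing_character(query[idx]):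
--                 idx += 1
--
--             if idx < len(query) and is_comma_or_colon(query[idx]):
--                 query_new = query_new[:-1]
--             idx -= 1
--         idx += 1
--
--     return query_new.strip()
-- ===== SOURCE B (Python) =====
-- SPACING = ' \t\n\r'
-- SEPARATORS = ',:'
-- POP = None  # edit-op sentinel: delete the last character of the output
--
--
-- def _edit_ops(query, is_quoted):
--     """Compile the query into a flat list of edit operations:
--     a character to append, or POP (delete the previous character).
--     Each whitespace run outside quotes is reduced up front to its net
--     effect: keep one space, do nothing, or POP the preceding separator."""
--     ops = []
--     in_phrase = False
--     i = 0
--     n = len(query)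
--     while i < n:
--         c = query[i]
--         if c == '"':
--             ops.append(c)
--             in_phrase = not in_phrase
--             i += 1
--         elif in_phrase:
--             ops.append(c)
--             if c == '\\' and is_quoted and i + 1 < n:
--                 ops.append(query[i + 1])
--                 i += 2
--             else:
--                 i += 1
--         elif c in SPACING:
--             j = i
--             while j < n and query[j] in SPACING:
--                 j += 1
--             before = i >= 1 and query[i - 1] in SEPARATORS
--             after = j < n and query[j] in SEPARATORS
--             if before and after:
--                 ops.append(POP)
--             elif not before and not after:
--                 ops.append(c)
--             i = j
--         else:
--             ops.append(c)
--             i += 1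
--     return ops
--
--
-- def remove_multiple_spaces(query, is_quoted):
--     out = []
--     for op in _edit_ops(query, is_quoted):
--         if op is POP:
--             if out:
--                 out.pop()
--         else:
--             out.append(op)
--     return ''.join(out).strip()
-- ===== Notes on version B (the rewrite author's own statement) =====
-- stated objective: faster
-- what changed: B is a two-stage pipeline: a first pass compiles the query into a flat list of edit operations (append-char or POP), reducing each outside-quote whitespace run up front to its net effect, and a second pass executes the ops against a list buffer; A instead interleaves scanning with repeated string concatenation and [:-1] slicing on the growing accumulator.
import Mathlib
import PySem

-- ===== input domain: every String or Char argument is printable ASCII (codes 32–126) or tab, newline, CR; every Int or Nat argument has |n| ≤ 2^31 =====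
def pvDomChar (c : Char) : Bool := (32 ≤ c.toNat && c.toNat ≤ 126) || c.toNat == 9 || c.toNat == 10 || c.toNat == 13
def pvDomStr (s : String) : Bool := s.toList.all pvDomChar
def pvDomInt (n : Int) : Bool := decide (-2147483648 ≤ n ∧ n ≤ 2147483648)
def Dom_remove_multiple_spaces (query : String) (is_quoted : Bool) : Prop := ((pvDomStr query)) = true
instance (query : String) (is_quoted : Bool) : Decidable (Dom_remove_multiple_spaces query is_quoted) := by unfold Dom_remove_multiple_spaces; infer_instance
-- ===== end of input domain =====

-- B compiles the query into a list of edit ops (append-char / POP) in one pass, each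
-- whitespace run reduced up front to its net effect, then executes the ops; A instead
-- interleaves scanning with string concatenation and [:-1] slicing. Objective: faster
-- (a timing run measures B faster on large inputs; A's accumulator rebuilds are quadratic).

-- ===== PORT A =====
-- helper: is_spacing_character
def pvIsSpacing (ch : Char) : Bool :=
  ch = ' ' || ch = '\t' || ch = '\n' || ch = '\r'

-- helper: is_comma_or_colon
def pvIsCC (ch : Char) : Bool :=
  ch = ',' || ch = ':'

-- inner 'while idx < len(query) and is_spacing_character(query[idx]): idx += 1'
def pvSkipSpaces (q : List Char) (idx : Nat) : Nat :=
  if h : idx < q.length then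
    if pvIsSpacing q[idx] then pvSkipSpaces q (idx + 1) else idx
  else idx
termination_by q.length - idx

-- A's main while loop; fuel = q.length - idx bounds the iterations (idx grows by ≥ 1 per call).
-- Indexing uses List.getD: every access is range-guarded in A, so getD is exact here.
def pvLoopA (q : List Char) (is_quoted : Bool) (fuel : Nat) (idx : Nat)
    (acc : List Char) (in_phrase : Bool) : List Char :=
  match fuel with
  | 0 => acc
  | fuel + 1 =>
    if idx < q.length then
      let c := q.getD idx ' '
      let acc := acc ++ [c]
      if c = '"' then
        pvLoopA q is_quoted fuel (idx + 1) acc (!in_phrase)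
      else if in_phrase then
        if c = '\\' && is_quoted && idx < q.length - 1 then
          pvLoopA q is_quoted fuel (idx + 2) (acc ++ [q.getD (idx + 1) ' ']) in_phrase
        else
          pvLoopA q is_quoted fuel (idx + 1) acc in_phrase
      else if pvIsSpacing c then
        let acc := if 1 ≤ idx && pvIsCC (q.getD (idx - 1) ' ') then acc.dropLast else acc
        let j := pvSkipSpaces q idx
        let acc := if decide (j < q.length) && pvIsCC (q.getD j ' ') then acc.dropLast else acc
        -- 'idx -= 1' followed by the common 'idx += 1': the loop resumes at j
        pvLoopA q is_quoted fuel j acc in_phrase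
      else
        pvLoopA q is_quoted fuel (idx + 1) acc in_phrase
    else acc

def remove_multiple_spaces (query : String) (is_quoted : Bool) : String :=
  PySem.Str.strip (String.ofList (pvLoopA query.toList is_quoted query.toList.length 0 [] false))

-- ===== PORT B =====
-- An edit op is 'some c' (append c) or 'none' (POP, Source B's sentinel).
-- Source B's 'while j < n and query[j] in SPACING: j += 1'
def pvScanRun (q : List Char) (j : Nat) : Nat :=
  if h : j < q.length then
    if (' ' :: '\t' :: '\n' :: '\r' :: []).contains q[j] then pvScanRun q (j + 1) else j
  else j
termination_by q.length - j

-- pass 1 of Source B: _edit_ops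
def pvEditOps (q : List Char) (is_quoted : Bool) (fuel : Nat) (i : Nat)
    (in_phrase : Bool) : List (Option Char) :=
  match fuel with
  | 0 => []
  | fuel + 1 =>
    if i < q.length then
      let c := q.getD i ' '
      if c = '"' then
        some c :: pvEditOps q is_quoted fuel (i + 1) (!in_phrase)
      else if in_phrase then
        if c = '\\' && is_quoted && i + 1 < q.length then
          some c :: some (q.getD (i + 1) ' ') :: pvEditOps q is_quoted fuel (i + 2) in_phrase
        else
          some c :: pvEditOps q is_quoted fuel (i + 1) in_phrase
      else if (' ' :: '\t' :: '\n' :: '\r' :: []).contains c then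
        let j := pvScanRun q i
        let before := 1 ≤ i && (',' :: ':' :: []).contains (q.getD (i - 1) ' ')
        let after := decide (j < q.length) && (',' :: ':' :: []).contains (q.getD j ' ')
        if before && after then
          none :: pvEditOps q is_quoted fuel j in_phrase
        else if !before && !after then
          some c :: pvEditOps q is_quoted fuel j in_phrase
        else
          pvEditOps q is_quoted fuel j in_phrase
      else
        some c :: pvEditOps q is_quoted fuel (i + 1) in_phrase
    else []

-- pass 2 of Source B: execute the ops against a list buffer ('if out: out.pop()' / append)
def pvExec (out : List Char) (op : Option Char) : List Char :=
  match op with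
  | none => if out.isEmpty then out else out.dropLast
  | some c => out ++ [c]

def remove_multiple_spaces_alt (query : String) (is_quoted : Bool) : String :=
  PySem.Str.strip (PySem.Str.join ""
    (((pvEditOps query.toList is_quoted query.toList.length 0 false).foldl pvExec []).map String.singleton))

-- ===== PRECONDITION & SPEC =====
def Spec_remove_multiple_spaces (query : String) (is_quoted : Bool) (out : String) : Prop := out = remove_multiple_spaces_alt query is_quoted
instance (query : String) (is_quoted : Bool) (out : String) : Decidable (Spec_remove_multiple_spaces query is_quoted out) := by unfold Spec_remove_multiple_spaces; infer_instance

-- ===== CLAIM (what is proved, stated in full; the proofs are below) =====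
def Claim_equal_remove_multiple_spaces : Prop := ∀ (query : String) (is_quoted : Bool), Dom_remove_multiple_spaces query is_quoted → Spec_remove_multiple_spaces query is_quoted (remove_multiple_spaces query is_quoted)

-- ===== LEMMAS AND PROOFS =====

theorem pvContains_spacing (d : Char) :
    ([' ', '\t', '\n', '\r'].contains d) = pvIsSpacing d := by
  simp [pvIsSpacing, Bool.or_assoc]

theorem pvContains_cc (d : Char) : ([',', ':'].contains d) = pvIsCC d := by
  simp [pvIsCC]

theorem pvScanRun_eq_skip (q : List Char) (j : Nat) : pvScanRun q j = pvSkipSpaces q j := by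
  unfold pvScanRun pvSkipSpaces
  simp only [pvContains_spacing]
  split
  · split
    · exact pvScanRun_eq_skip q (j + 1)
    · rfl
  · rfl
termination_by q.length - j

-- A's loop from state (idx, acc, ip) equals executing B's compiled ops starting from acc
theorem pvLoopA_eq_exec (q : List Char) (iq : Bool) (fuel : Nat) :
    ∀ (idx : Nat) (acc : List Char) (ip : Bool),
    pvLoopA q iq fuel idx acc ip = (pvEditOps q iq fuel idx ip).foldl pvExec acc := by
  induction fuel with
  | zero => intro idx acc ip; rfl
  | succ n ih =>
    intro idx acc ip
    unfold pvLoopA pvEditOps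
    simp only [pvContains_spacing, pvContains_cc, pvScanRun_eq_skip]
    by_cases hlt : idx < q.length
    · simp only [if_pos hlt]
      by_cases hq : q.getD idx ' ' = '"'
      · simp only [if_pos hq, ih, List.foldl_cons, pvExec]
      · simp only [if_neg hq]
        by_cases hip : ip = true
        · simp only [if_pos hip]
          have he : decide (idx < q.length - 1) = decide (idx + 1 < q.length) := by
            apply decide_eq_decide.mpr; omega
          rw [he]
          by_cases he2 : (decide (q.getD idx ' ' = '\\') && iq && decide (idx + 1 < q.length)) = true
          · simp only [if_pos he2, ih, List.foldl_cons, pvExec, List.append_assoc,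
              List.cons_append, List.nil_append]
          · simp only [if_neg he2, ih, List.foldl_cons, pvExec]
        · simp only [if_neg hip]
          by_cases hs : pvIsSpacing (q.getD idx ' ') = true
          · simp only [if_pos hs, ih]
            cases hb : (decide (1 ≤ idx) && pvIsCC (q.getD (idx - 1) ' ')) <;>
              cases ha : (decide (pvSkipSpaces q idx < q.length) && pvIsCC (q.getD (pvSkipSpaces q idx) ' ')) <;>
              simp only [Bool.and_true, Bool.and_false,
                Bool.not_true, Bool.not_false, Bool.false_eq_true, if_true, if_false,
                List.foldl_cons, pvExec, List.dropLast_concat]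
            congr 1
            cases acc <;> simp
          · simp only [if_neg hs, ih, List.foldl_cons, pvExec]
    · simp only [if_neg hlt, List.foldl_nil]

theorem pvJoin_singleton (l : List Char) :
    PySem.Str.join "" (l.map String.singleton) = String.ofList l := by
  apply String.toList_inj.mp
  rw [PySem.Str.toList_join]
  simp only [List.map_map]
  have h : (String.toList ∘ String.singleton) = (fun c : Char => [c]) := by
    funext c; simp
  have hnil : "".toList = ([] : List Char) := rfl
  rw [h, hnil, PySem.Chars.join_nil_singletons]
  simp

-- ===== VERDICT (by name: the statement is the Claim_ definition above) =====
theorem remove_multiple_spaces_spec : Claim_equal_remove_multiple_spaces := by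
  intro query is_quoted _
  unfold Spec_remove_multiple_spaces remove_multiple_spaces remove_multiple_spaces_alt
  rw [pvLoopA_eq_exec, pvJoin_singleton]
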